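-- pv_equiv track=rewrite | github.com/TepidJesus/UoA-CompSci-Resources | COMP130/get_pair_sums.py | get_pair_sum_over
-- ===== SOURCE A (Python) =====
-- def get_pair_sum_over(numbers_list, target_sum):
--     numbers_list.sort()
--     tuples_list = []
--
--     for i in range(len(numbers_list)):
--
--         for j in range(i + 1, len(numbers_list)):
--
--             if numbers_list[i] + numbers_list[j] > target_sum:
--                 if (numbers_list[i], numbers_list[j]) not in tuples_list: # REMOVE THIS TO RETURN DUPLICATE PAIRS.
--                     tuples_list.append((numbers_list[i], numbers_list[j]))
--
--     return tuples_list
-- ===== SOURCE B (Python) =====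
-- def get_pair_sum_over(numbers_list, target_sum):
--     numbers_list.sort()
--     counts = {}
--     for x in numbers_list:
--         counts[x] = counts.get(x, 0) + 1
--     vals = sorted(counts.keys())
--     pairs = []
--     for a_i, a in enumerate(vals):
--         for b in vals[a_i:]:
--             if a + b > target_sum and (a < b or counts[a] >= 2):
--                 pairs.append((a, b))
--     return pairs
-- ===== Notes on version B (the rewrite author's own statement) =====
-- stated objective: faster
-- what changed: Replaces the nested scan over all index pairs with a membership-list dedup by a value->count dict plus a double loop over the distinct sorted values with a multiplicity guard (equal-value pair only when the value occurs twice), so the output list is never searched.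
import Mathlib
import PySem

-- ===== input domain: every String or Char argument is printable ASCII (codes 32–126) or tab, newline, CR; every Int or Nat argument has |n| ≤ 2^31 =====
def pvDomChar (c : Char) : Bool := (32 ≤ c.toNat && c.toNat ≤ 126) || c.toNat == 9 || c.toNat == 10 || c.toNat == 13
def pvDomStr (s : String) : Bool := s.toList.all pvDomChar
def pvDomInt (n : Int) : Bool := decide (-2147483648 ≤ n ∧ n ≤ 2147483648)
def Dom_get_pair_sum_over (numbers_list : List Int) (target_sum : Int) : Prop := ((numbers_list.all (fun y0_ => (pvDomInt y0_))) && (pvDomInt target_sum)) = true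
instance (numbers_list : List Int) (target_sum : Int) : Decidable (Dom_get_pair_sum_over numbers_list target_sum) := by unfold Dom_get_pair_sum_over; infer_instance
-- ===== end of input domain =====

-- B replaces A's all-index-pairs scan with a `not in` dedup list by a value->count table and a
-- double loop over the distinct sorted values with a multiplicity guard (measured faster by the
-- timing run; A rescans the output list per pair, B never searches it).
-- Both A and B sort numbers_list in place; the equivalence proved is about the return value
-- (the in-place sort side effect is identical in A and B).

-- ===== PORT A =====
def get_pair_sum_over (numbers_list : List Int) (target_sum : Int) : List (Int × Int) :=
  let s := PySem.List.sorted numbers_list (fun x => x) false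
  (PySem.List.pyRange 0 (s.length : Int) 1).foldl (fun acc i =>
    (PySem.List.pyRange (i + 1) (s.length : Int) 1).foldl (fun acc j =>
      if PySem.List.pyGetD s i 0 + PySem.List.pyGetD s j 0 > target_sum then
        if (PySem.List.pyGetD s i 0, PySem.List.pyGetD s j 0) ∈ acc then acc
        else acc ++ [(PySem.List.pyGetD s i 0, PySem.List.pyGetD s j 0)]
      else acc) acc) []

-- ===== PORT B =====
def get_pair_sum_over_alt (numbers_list : List Int) (target_sum : Int) : List (Int × Int) :=
  let s := PySem.List.sorted numbers_list (fun x => x) false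
  -- counts[x] = counts.get(x, 0) + 1
  let counts := s.foldl (fun d x => d.insert x (d.getD x 0 + 1)) (PySem.Dict.empty : PySem.Dict Int Int)
  let vals := PySem.List.sorted counts.keys (fun x => x) false
  -- counts[a] is a present-key lookup (a ∈ vals ⊆ keys), ported as getD with default 0
  (PySem.List.enumerate vals 0).foldl (fun acc p =>
    (PySem.List.slice vals (some p.1) none).foldl (fun acc b =>
      if p.2 + b > target_sum ∧ (p.2 < b ∨ counts.getD p.2 0 ≥ 2) then acc ++ [(p.2, b)]
      else acc) acc) []

-- ===== PRECONDITION & SPEC =====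
def Spec_get_pair_sum_over (numbers_list : List Int) (target_sum : Int) (out : List (Int × Int)) : Prop := out = get_pair_sum_over_alt numbers_list target_sum
instance (numbers_list : List Int) (target_sum : Int) (out : List (Int × Int)) : Decidable (Spec_get_pair_sum_over numbers_list target_sum out) := by unfold Spec_get_pair_sum_over; infer_instance

-- ===== CLAIM (what is proved, stated in full; the proofs are below) =====
def Claim_equal_get_pair_sum_over : Prop := ∀ (numbers_list : List Int) (target_sum : Int), Dom_get_pair_sum_over numbers_list target_sum → Spec_get_pair_sum_over numbers_list target_sum (get_pair_sum_over numbers_list target_sum)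

-- ===== LEMMAS AND PROOFS =====

-- keep-first dedup (the semantics of A's `not in` accumulator), structural form
def kf {α : Type} [BEq α] : List α → List α
  | [] => []
  | x :: xs => x :: (kf xs).filter (fun y => !(y == x))

-- A's structural pair list: for each position, pairs with every later position whose sum exceeds t
def pairsF (t : Int) : List Int → List (Int × Int)
  | [] => []
  | x :: xs => (xs.filter (fun b => decide (x + b > t))).map (fun b => (x, b)) ++ pairsF t xs

-- B's structural loop over the distinct values
def bpairs (t : Int) (cnt : Int → Int) : List Int → List (Int × Int)
  | [] => []
  | v :: vs => ((v :: vs).filter (fun b => decide (v + b > t ∧ (v < b ∨ cnt v ≥ 2)))).map (fun b => (v, b)) ++ bpairs t cnt vs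

theorem mem_kf {α : Type} [BEq α] [LawfulBEq α] (l : List α) (y : α) : y ∈ kf l ↔ y ∈ l := by
  induction l with
  | nil => simp [kf]
  | cons x xs ih =>
    simp only [kf, List.mem_cons, List.mem_filter, ih]
    by_cases hy : y = x <;> simp [hy]

theorem kf_filter {α : Type} [BEq α] [LawfulBEq α] (p : α → Bool) (l : List α) :
    kf (l.filter p) = (kf l).filter p := by
  induction l with
  | nil => simp [kf]
  | cons x xs ih =>
    by_cases hx : p x
    · simp only [List.filter_cons, hx, if_true, kf, ih, List.filter_filter]
      congr 1
      exact List.filter_congr fun y _ => Bool.and_comm _ _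
    · rw [List.filter_cons_of_neg hx, ih, kf, List.filter_cons_of_neg hx, List.filter_filter,
        List.filter_congr (fun y _ => ?_)]
      by_cases hy : y = x <;> simp [hy, hx]

theorem kf_append {α : Type} [BEq α] [LawfulBEq α] (u v : List α) :
    kf (u ++ v) = kf u ++ (kf v).filter (fun y => y ∉ u) := by
  induction u with
  | nil => simp [kf]
  | cons x u' ih =>
    simp only [List.cons_append, kf, ih, List.filter_append, List.filter_filter]
    congr 2
    apply List.filter_congr
    intro y _
    by_cases hy : y = x <;> by_cases hu : y ∈ u' <;> simp [hy, hu]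

theorem kf_map_inj {α β : Type} [BEq α] [LawfulBEq α] [BEq β] [LawfulBEq β] (f : α → β)
    (hf : Function.Injective f) (l : List α) : kf (l.map f) = (kf l).map f := by
  induction l with
  | nil => simp [kf]
  | cons x xs ih =>
    simp only [List.map_cons, kf, ih, List.filter_map]
    congr 2
    apply List.filter_congr
    intro y _
    simp only [Function.comp_apply]
    by_cases hy : y = x
    · simp [hy]
    · simp [hy, hf.ne hy]

theorem kf_replicate {α : Type} [BEq α] [LawfulBEq α] (m : Nat) (x : α) :
    kf (List.replicate m x) = if m = 0 then [] else [x] := by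
  induction m with
  | zero => simp [kf]
  | succ k ih =>
    simp only [List.replicate_succ, kf, ih]
    rcases Nat.eq_zero_or_pos k with hk | hk
    · simp [hk]
    · simp [Nat.pos_iff_ne_zero.mp hk]

theorem kf_sublist {α : Type} [BEq α] (l : List α) : (kf l).Sublist l := by
  induction l with
  | nil => simp [kf]
  | cons x xs ih =>
    exact List.Sublist.cons₂ x (List.Sublist.trans List.filter_sublist ih)

-- the master lemma: a `not in acc`-guarded append loop is keep-first dedup
theorem foldl_dedup_eq_kf {α : Type} [BEq α] [LawfulBEq α] (l : List α) (acc : List α) :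
    l.foldl (fun acc x => if x ∈ acc then acc else acc ++ [x]) acc
      = acc ++ (kf l).filter (fun x => x ∉ acc) := by
  induction l generalizing acc with
  | nil => simp [kf]
  | cons x xs ih =>
    rw [List.foldl_cons]
    by_cases hx : x ∈ acc
    · rw [if_pos hx, ih, kf, List.filter_cons_of_neg (by simp [hx]), List.filter_filter]
      congr 1
      refine (List.filter_congr fun y _ => ?_).symm
      by_cases hy : y = x <;> simp [hy, hx]
    · rw [if_neg hx, ih, kf, List.filter_cons_of_pos (by simp [hx]), List.filter_filter]
      simp only [List.append_assoc, List.singleton_append]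
      congr 2
      refine List.filter_congr fun y _ => ?_
      by_cases hy : y = x <;> simp [hy, hx, List.mem_append]

theorem dl_flat {α : Type} (idxs : List α) (g : α → List (Int × Int)) (acc : List (Int × Int)) :
    idxs.foldl (fun acc i => (g i).foldl (fun acc x => if x ∈ acc then acc else acc ++ [x]) acc) acc
      = (idxs.flatMap g).foldl (fun acc x => if x ∈ acc then acc else acc ++ [x]) acc := by
  induction idxs generalizing acc with
  | nil => simp
  | cons i idxs ih => simp [List.foldl_append, ih]

theorem fst_mem_of_mem_pairsF (t : Int) (l : List Int) (q : Int × Int) (h : q ∈ pairsF t l) : q.1 ∈ l := by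
  induction l with
  | nil => simp [pairsF] at h
  | cons x xs ih =>
    simp only [pairsF, List.mem_append, List.mem_map, List.mem_filter] at h
    rcases h with ⟨b, _, rfl⟩ | h
    · simp
    · exact List.mem_cons_of_mem x (ih h)

theorem bpairs_congr (t : Int) (c1 c2 : Int → Int) (vs : List Int)
    (h : ∀ v ∈ vs, c1 v = c2 v) : bpairs t c1 vs = bpairs t c2 vs := by
  induction vs with
  | nil => rfl
  | cons v vs ih =>
    rw [bpairs, bpairs, h v (List.mem_cons_self), ih (fun w hw => h w (List.mem_cons_of_mem v hw))]

-- per-index block of A's inner loop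
def gblock (s : List Int) (t : Int) (k : Nat) : List (Int × Int) :=
  ((s.drop (k + 1)).filter (fun b => decide (s.getD k 0 + b > t))).map (fun b => (s.getD k 0, b))

theorem flat_pairs (t : Int) (s : List Int) :
    (List.range s.length).flatMap (gblock s t) = pairsF t s := by
  induction s with
  | nil => simp [pairsF]
  | cons x xs ih =>
    rw [List.length_cons, List.range_succ_eq_map, List.flatMap_cons, List.flatMap_map]
    have h1 : gblock (x :: xs) t 0 = (xs.filter (fun b => decide (x + b > t))).map (fun b => (x, b)) := by
      simp [gblock]
    have h2 : (fun a => gblock (x :: xs) t (Nat.succ a)) = gblock xs t := by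
      funext k
      simp [gblock, List.drop_succ_cons]
    rw [h1, h2, ih, pairsF]

theorem foldl_pair_map (a : Int) (l : List Int) (acc : List (Int × Int)) :
    l.foldl (fun acc b => if (a, b) ∈ acc then acc else acc ++ [(a, b)]) acc
      = (l.map (fun b => (a, b))).foldl (fun acc x => if x ∈ acc then acc else acc ++ [x]) acc := by
  rw [List.foldl_map]

-- A's port equals keep-first dedup of the structural pair list of the sorted input
theorem A_eq (l : List Int) (t : Int) :
    get_pair_sum_over l t = kf (pairsF t (PySem.List.sorted l (fun x => x) false)) := by
  unfold get_pair_sum_over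
  generalize PySem.List.sorted l (fun x => x) false = s
  show (PySem.List.pyRange 0 (s.length : Int) 1).foldl (fun acc i =>
    (PySem.List.pyRange (i + 1) (s.length : Int) 1).foldl (fun acc j =>
      if PySem.List.pyGetD s i 0 + PySem.List.pyGetD s j 0 > t then
        if (PySem.List.pyGetD s i 0, PySem.List.pyGetD s j 0) ∈ acc then acc
        else acc ++ [(PySem.List.pyGetD s i 0, PySem.List.pyGetD s j 0)]
      else acc) acc) [] = kf (pairsF t s)
  rw [PySem.List.pyRange_one, Int.sub_zero, Int.toNat_natCast, List.foldl_map]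
  rw [PySem.List.foldl_congr_mem _ _
    (fun acc k => (gblock s t k).foldl (fun acc x => if x ∈ acc then acc else acc ++ [x]) acc) _ ?_]
  · rw [dl_flat, flat_pairs]
    refine (foldl_dedup_eq_kf (pairsF t s) []).trans ?_
    simp
  · intro acc k _
    have hz : (0 : Int) + (k : Int) = ((k : Nat) : Int) := by ring
    rw [hz, PySem.List.pyGetD_natCast]
    have h1 : (0 : Int) ≤ (k : Int) + 1 := by positivity
    rw [PySem.List.foldl_pyRange_pyGetD' s 0
      (fun acc b => if s.getD k 0 + b > t then
        (if (s.getD k 0, b) ∈ acc then acc else acc ++ [(s.getD k 0, b)]) else acc) acc h1]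
    have h2 : ((k : Int) + 1).toNat = k + 1 := by omega
    rw [h2, PySem.List.foldl_ite_eq_foldl_filter (fun b => s.getD k 0 + b > t)
      (fun acc b => if (s.getD k 0, b) ∈ acc then acc else acc ++ [(s.getD k 0, b)]) _ acc,
      foldl_pair_map (s.getD k 0) ((s.drop (k + 1)).filter (fun b => decide (s.getD k 0 + b > t))) acc]
    simp only [gblock]

theorem bfold_aux (t : Int) (c : Int → Int) (V : List Int) (vals : List Int) :
    ∀ (i : Nat), V.drop i = vals → ∀ acc,
    (PySem.List.enumerate vals (i : Int)).foldl (fun acc p =>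
      (PySem.List.slice V (some p.1) none).foldl (fun acc b =>
        if p.2 + b > t ∧ (p.2 < b ∨ c p.2 ≥ 2) then acc ++ [(p.2, b)] else acc) acc) acc
      = acc ++ bpairs t c vals := by
  induction vals with
  | nil => intro i _ acc; simp [PySem.List.enumerate_nil, bpairs]
  | cons v vs ih =>
    intro i hdrop acc
    rw [PySem.List.enumerate_cons, List.foldl_cons]
    have hsl : PySem.List.slice V (some ((i : Nat) : Int)) none = v :: vs := by
      rw [PySem.List.slice_from_natCast, hdrop]
    dsimp only
    rw [hsl, PySem.List.foldl_append_ite (fun b => v + b > t ∧ (v < b ∨ c v ≥ 2)) (fun b => (v, b))]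
    have hc : ((i : Int) + 1) = (((i + 1 : Nat)) : Int) := by push_cast; ring
    have hdrop' : V.drop (i + 1) = vs := by
      have : V.drop (i + 1) = (V.drop i).drop 1 := by rw [List.drop_drop]
      rw [this, hdrop, List.drop_one, List.tail_cons]
    rw [hc, ih (i + 1) hdrop', bpairs, List.append_assoc]

-- B's port equals the structural distinct-values loop
theorem B_eq (l : List Int) (t : Int) :
    get_pair_sum_over_alt l t
      = bpairs t (fun v => ((PySem.List.sorted l (fun x => x) false).count v : Int))
          (kf (PySem.List.sorted l (fun x => x) false)) := by
  unfold get_pair_sum_over_alt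
  generalize hs : PySem.List.sorted l (fun x => x) false = s
  show (PySem.List.enumerate (PySem.List.sorted (s.foldl (fun d x => d.insert x (d.getD x 0 + 1)) (PySem.Dict.empty : PySem.Dict Int Int)).keys (fun x => x) false) 0).foldl (fun acc p =>
      (PySem.List.slice (PySem.List.sorted (s.foldl (fun d x => d.insert x (d.getD x 0 + 1)) (PySem.Dict.empty : PySem.Dict Int Int)).keys (fun x => x) false) (some p.1) none).foldl (fun acc b =>
        if p.2 + b > t ∧ (p.2 < b ∨ (s.foldl (fun d x => d.insert x (d.getD x 0 + 1)) (PySem.Dict.empty : PySem.Dict Int Int)).getD p.2 0 ≥ 2) then acc ++ [(p.2, b)]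
        else acc) acc) [] = bpairs t (fun v => (s.count v : Int)) (kf s)
  have hsort : s.Pairwise (· ≤ ·) := by
    rw [← hs]; exact PySem.List.sorted_pairwise l (fun x => x)
  set counts := s.foldl (fun d x => d.insert x (d.getD x 0 + 1)) (PySem.Dict.empty : PySem.Dict Int Int) with hcounts
  have hkeys : counts.keys = kf s := by
    rw [hcounts, PySem.Dict.keys_foldl_insert s (fun d x => d.getD x 0 + 1) _, PySem.Dict.keys_empty]
    show s.foldl PySem.Set.add [] = kf s
    rw [PySem.List.foldl_congr_mem _ _ (fun acc x => if x ∈ acc then acc else acc ++ [x]) _ ?_]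
    · refine (foldl_dedup_eq_kf s []).trans ?_
      simp
    · intro acc x _
      show PySem.Set.add acc x = _
      simp only [PySem.Set.add, PySem.Set.contains]
      split_ifs with h1 h2 h2 <;> first | rfl | (exfalso; revert h1; simp_all)
  have hkf : (kf s).Pairwise (fun a b => a ≤ b) := hsort.sublist (kf_sublist s)
  have hvals : PySem.List.sorted counts.keys (fun x => x) false = kf s := by
    rw [hkeys]; exact PySem.List.sorted_eq_self_of_pairwise _ _ hkf
  have hcnt : ∀ v, counts.getD v 0 = (s.count v : Int) := by
    intro v
    rw [hcounts, PySem.Dict.getD_foldl_insert_add_one s _ v, PySem.Dict.getD_empty]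
    ring
  rw [hvals]
  have hb := bfold_aux t (fun v => counts.getD v 0) (kf s) (kf s) 0 (by simp) []
  rw [Nat.cast_zero] at hb
  rw [hb, List.nil_append]
  exact bpairs_congr t _ _ _ (fun v _ => hcnt v)


-- a run of (m+1) copies of a, then r with all elements > a
theorem kf_run (a : Int) (m : Nat) (r : List Int) (ha : a ∉ r) :
    kf (List.replicate (m + 1) a ++ r) = a :: kf r := by
  rw [kf_append, kf_replicate]
  simp only [Nat.succ_ne_zero, if_false, List.singleton_append]
  congr 1
  rw [List.filter_eq_self]
  intro y hy
  have : y ∈ r := (mem_kf r y).mp hy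
  have : y ≠ a := fun h => ha (h ▸ this)
  simp [List.mem_replicate, this]

theorem claim_run (t a : Int) (r : List Int) (ha : ∀ y ∈ r, a < y) (m : Nat) :
    kf (pairsF t (List.replicate (m + 1) a ++ r))
      = (if 1 ≤ m ∧ a + a > t then [(a, a)] else [])
        ++ ((kf r).filter (fun b => decide (a + b > t))).map (fun b => (a, b))
        ++ kf (pairsF t r) := by
  have hanr : a ∉ r := fun h => absurd (ha a h) (lt_irrefl a)
  have hKkeep : ∀ (w : List Int),
      (kf (pairsF t r)).filter (fun y => decide (y ∉ (w.filter (fun b => decide (a + b > t))).map (fun b => ((a : Int), b)))) = kf (pairsF t r) := by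
    intro w
    rw [List.filter_eq_self]
    intro q hq
    have hq1 : q.1 ∈ r := fst_mem_of_mem_pairsF t r q ((mem_kf _ _).mp hq)
    have hlt : a < q.1 := ha _ hq1
    simp only [decide_eq_true_eq]
    intro hmem
    rcases List.mem_map.mp hmem with ⟨b, _, hb⟩
    exact absurd (hb ▸ rfl : q.1 = a).symm (ne_of_lt hlt)
  induction m with
  | zero =>
    rw [show List.replicate 1 a ++ r = a :: r by simp]
    rw [show pairsF t (a :: r) = (r.filter (fun b => decide (a + b > t))).map (fun b => (a, b)) ++ pairsF t r from rfl]
    rw [kf_append, kf_map_inj _ (fun b c h => (Prod.mk.injEq .. ▸ h : _ ∧ _).2), kf_filter]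
    rw [if_neg (by simp : ¬(1 ≤ 0 ∧ a + a > t)), List.nil_append]
    congr 1
    exact hKkeep r
  | succ m ih =>
    rw [show List.replicate (m + 2) a ++ r = a :: (List.replicate (m + 1) a ++ r) by rw [List.replicate_succ, List.cons_append]]
    rw [show pairsF t (a :: (List.replicate (m + 1) a ++ r))
        = ((List.replicate (m + 1) a ++ r).filter (fun b => decide (a + b > t))).map (fun b => (a, b))
          ++ pairsF t (List.replicate (m + 1) a ++ r) from rfl]
    rw [kf_append, kf_map_inj _ (fun b c h => (Prod.mk.injEq .. ▸ h : _ ∧ _).2), kf_filter, kf_run a m r hanr, ih]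
    have hhead : ((a :: kf r).filter (fun b => decide (a + b > t))).map (fun b => ((a : Int), b))
        = (if a + a > t then [((a : Int), a)] else []) ++ ((kf r).filter (fun b => decide (a + b > t))).map (fun b => (a, b)) := by
      by_cases hp : a + a > t
      · rw [List.filter_cons_of_pos (by simpa using hp), List.map_cons, if_pos hp, List.singleton_append]
      · rw [List.filter_cons_of_neg (by simpa using hp), if_neg hp, List.nil_append]
    rw [hhead]
    have hB : ∀ q ∈ (if 1 ≤ m ∧ a + a > t then [((a : Int), a)] else [])
          ++ ((kf r).filter (fun b => decide (a + b > t))).map (fun b => ((a : Int), b)),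
        q ∈ (((List.replicate (m + 1) a ++ r).filter (fun b => decide (a + b > t))).map (fun b => ((a : Int), b))) := by
      intro q hq
      rcases List.mem_append.mp hq with hq1 | hq2
      · have hcond : 1 ≤ m ∧ a + a > t := by
          by_contra hc
          rw [if_neg hc] at hq1
          exact absurd hq1 (List.not_mem_nil)
        rw [if_pos hcond] at hq1
        rw [List.mem_singleton] at hq1
        subst hq1
        refine List.mem_map.mpr ⟨a, ?_, rfl⟩
        exact List.mem_filter.mpr ⟨List.mem_append_left _ (List.mem_replicate.mpr ⟨Nat.succ_ne_zero m, rfl⟩), by simpa using hcond.2⟩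
      · rcases List.mem_map.mp hq2 with ⟨b, hb, rfl⟩
        rcases List.mem_filter.mp hb with ⟨hbr, hbt⟩
        exact List.mem_map.mpr ⟨b, List.mem_filter.mpr ⟨List.mem_append_right _ ((mem_kf r b).mp hbr), hbt⟩, rfl⟩
    rw [List.filter_append, List.filter_append]
    rw [show ((if 1 ≤ m ∧ a + a > t then [((a : Int), a)] else []).filter
        (fun y => decide (y ∉ ((List.replicate (m + 1) a ++ r).filter (fun b => decide (a + b > t))).map (fun b => ((a : Int), b))))) = [] from
      List.filter_eq_nil_iff.mpr (fun q hq => by simp only [decide_eq_true_eq, not_not]; exact hB q (List.mem_append_left _ hq))]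
    rw [show (((kf r).filter (fun b => decide (a + b > t))).map (fun b => ((a : Int), b))).filter
        (fun y => decide (y ∉ ((List.replicate (m + 1) a ++ r).filter (fun b => decide (a + b > t))).map (fun b => ((a : Int), b)))) = [] from
      List.filter_eq_nil_iff.mpr (fun q hq => by simp only [decide_eq_true_eq, not_not]; exact hB q (List.mem_append_right _ hq))]
    rw [hKkeep (List.replicate (m + 1) a ++ r)]
    by_cases hp : a + a > t <;> simp [hp]

theorem run_decomp (s : List Int) (hs : s.Pairwise (· ≤ ·)) :
    s = [] ∨ ∃ a m r, s = List.replicate (m + 1) a ++ r ∧ r.Pairwise (· ≤ ·) ∧ (∀ y ∈ r, a < y) := by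
  induction s with
  | nil => exact Or.inl rfl
  | cons x xs ih =>
    obtain ⟨hall, hxs⟩ := List.pairwise_cons.mp hs
    right
    rcases ih hxs with rfl | ⟨a, m, r, rfl, hr, har⟩
    · exact ⟨x, 0, [], by simp, List.Pairwise.nil, by simp⟩
    · by_cases hxa : x = a
      · subst hxa
        exact ⟨x, m + 1, r, by simp [List.replicate_succ], hr, har⟩
      · refine ⟨x, 0, List.replicate (m + 1) a ++ r, by simp, hxs, ?_⟩
        intro y hy
        have hxA : x ≤ a := hall a (List.mem_append_left _ (List.mem_replicate.mpr ⟨Nat.succ_ne_zero m, rfl⟩))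
        have hxa' : x < a := lt_of_le_of_ne hxA hxa
        rcases List.mem_append.mp hy with hy1 | hy2
        · rw [(List.mem_replicate.mp hy1).2]
          exact hxa'
        · exact lt_trans hxa' (har y hy2)

theorem mainC (t : Int) (n : Nat) : ∀ (s : List Int), s.length ≤ n → s.Pairwise (· ≤ ·) →
    kf (pairsF t s) = bpairs t (fun v => (s.count v : Int)) (kf s) := by
  induction n with
  | zero =>
    intro s hlen _
    rw [List.length_eq_zero_iff.mp (Nat.le_zero.mp hlen)]
    rfl
  | succ n ih =>
    intro s hlen hs
    rcases run_decomp s hs with rfl | ⟨a, m, r, rfl, hr, har⟩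
    · rfl
    · have hanr : a ∉ r := fun h => absurd (har a h) (lt_irrefl a)
      have hlr : r.length ≤ n := by
        rw [List.length_append, List.length_replicate] at hlen
        omega
      rw [claim_run t a r har m, kf_run a m r hanr]
      have hcnta : ((List.replicate (m + 1) a ++ r).count a : Int) = (m : Int) + 1 := by
        rw [List.count_append, List.count_replicate, if_pos (beq_self_eq_true a), List.count_eq_zero.mpr hanr]
        push_cast
        ring
      -- unfold one step of bpairs on (a :: kf r)
      rw [show bpairs t (fun v => ((List.replicate (m + 1) a ++ r).count v : Int)) (a :: kf r)
          = ((a :: kf r).filter (fun b => decide (a + b > t ∧ (a < b ∨ ((List.replicate (m + 1) a ++ r).count a : Int) ≥ 2)))).map (fun b => (a, b))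
            ++ bpairs t (fun v => ((List.replicate (m + 1) a ++ r).count v : Int)) (kf r) from rfl]
      -- head element of the filter
      have hhead : ((a :: kf r).filter (fun b => decide (a + b > t ∧ (a < b ∨ ((List.replicate (m + 1) a ++ r).count a : Int) ≥ 2)))).map (fun b => ((a : Int), b))
          = (if 1 ≤ m ∧ a + a > t then [((a : Int), a)] else [])
            ++ ((kf r).filter (fun b => decide (a + b > t))).map (fun b => (a, b)) := by
        rw [List.filter_cons]
        have hcc : (decide (a + a > t ∧ (a < a ∨ ((List.replicate (m + 1) a ++ r).count a : Int) ≥ 2)))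
            = decide (1 ≤ m ∧ a + a > t) := by
          rw [hcnta]
          by_cases h1 : a + a > t <;> by_cases h2 : 1 ≤ m <;>
            simp [h1, h2] <;> omega
        rw [hcc]
        have htail : (kf r).filter (fun b => decide (a + b > t ∧ (a < b ∨ ((List.replicate (m + 1) a ++ r).count a : Int) ≥ 2)))
            = (kf r).filter (fun b => decide (a + b > t)) := by
          refine List.filter_congr fun b hb => ?_
          have : a < b := har b ((mem_kf r b).mp hb)
          simp [this]
        rw [htail]
        by_cases hc : 1 ≤ m ∧ a + a > t
        · rw [if_pos (decide_eq_true hc), if_pos hc, List.map_cons, List.singleton_append]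
        · rw [if_neg (by simpa using hc), if_neg hc, List.nil_append]
      rw [hhead]
      congr 1
      -- recursive part: counts agree on values of r, then apply ih
      rw [show bpairs t (fun v => ((List.replicate (m + 1) a ++ r).count v : Int)) (kf r)
          = bpairs t (fun v => (r.count v : Int)) (kf r) from
        bpairs_congr t _ _ _ (fun v hv => by
          have hva : v ≠ a := fun h => absurd (h ▸ har v ((mem_kf r v).mp hv)) (lt_irrefl a)
          rw [List.count_append, List.count_replicate, if_neg (by simpa using fun h => hva h.symm), Nat.zero_add])]
      exact ih r hlr hr

-- ===== VERDICT (by name: the statement is the Claim_ definition above) =====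
theorem get_pair_sum_over_spec : Claim_equal_get_pair_sum_over := by
  intro l t _
  unfold Spec_get_pair_sum_over
  rw [A_eq, B_eq]
  exact mainC t _ _ le_rfl (PySem.List.sorted_pairwise l (fun x => x))
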